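-- pv_equiv track=rewrite | github.com/lukau2357/point2cad_repr | scripts/aggregate_eval.py | split_keys_by_class
-- ===== SOURCE A (Python) =====
-- def split_keys_by_class(class_of, keys):
--     prim, free, unk = [], [], []
--     for k in keys:
--         c = class_of.get(k)
--         if c == "primitive_only":
--             prim.append(k)
--         elif c == "has_freeform":
--             free.append(k)
--         else:
--             unk.append(k)
--     return prim, free, unk
-- ===== SOURCE B (Python) =====
-- def split_keys_by_class(class_of, keys):
--     prim = [k for k in keys if class_of.get(k) == "primitive_only"]
--     free = [k for k in keys if class_of.get(k) == "has_freeform"]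
--     unk = [k for k in keys if class_of.get(k) not in ("primitive_only", "has_freeform")]
--     return prim, free, unk
-- ===== Notes on version B (the rewrite author's own statement) =====
-- stated objective: idiomatic
-- what changed: Replaces the single fused loop with three-accumulator state by three independent list-comprehension passes over keys, one per output class.
import Mathlib
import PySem

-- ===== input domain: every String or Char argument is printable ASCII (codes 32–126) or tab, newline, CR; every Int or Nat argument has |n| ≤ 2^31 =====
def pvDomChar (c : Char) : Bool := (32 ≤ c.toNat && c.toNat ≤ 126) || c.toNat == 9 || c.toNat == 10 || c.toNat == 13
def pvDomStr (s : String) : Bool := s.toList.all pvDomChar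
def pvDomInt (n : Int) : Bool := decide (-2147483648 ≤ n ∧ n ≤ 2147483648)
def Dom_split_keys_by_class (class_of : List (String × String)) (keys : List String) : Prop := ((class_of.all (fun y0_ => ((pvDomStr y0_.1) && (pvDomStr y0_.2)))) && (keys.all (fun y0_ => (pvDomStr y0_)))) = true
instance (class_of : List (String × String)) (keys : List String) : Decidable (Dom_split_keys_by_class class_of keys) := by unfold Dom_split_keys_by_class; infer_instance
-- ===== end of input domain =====

/- B partitions keys with three independent filter passes instead of A's single fused loop; objective: idiomatic. -/


-- ===== PORT A =====
def split_keys_by_class (class_of : List (String × String)) (keys : List String) : List String × List String × List String :=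
  keys.foldl (fun acc k =>
    let c := PySem.Dict.get? (PySem.Dict.mk class_of) k
    if c == some "primitive_only" then (acc.1 ++ [k], acc.2.1, acc.2.2)
    else if c == some "has_freeform" then (acc.1, acc.2.1 ++ [k], acc.2.2)
    else (acc.1, acc.2.1, acc.2.2 ++ [k])) ([], [], [])

-- ===== PORT B =====
def split_keys_by_class_alt (class_of : List (String × String)) (keys : List String) : List String × List String × List String :=
  (keys.filter (fun k => PySem.Dict.get? (PySem.Dict.mk class_of) k == some "primitive_only"),
   keys.filter (fun k => PySem.Dict.get? (PySem.Dict.mk class_of) k == some "has_freeform"),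
   keys.filter (fun k => !(PySem.Dict.get? (PySem.Dict.mk class_of) k == some "primitive_only"
                           || PySem.Dict.get? (PySem.Dict.mk class_of) k == some "has_freeform")))

-- ===== PRECONDITION & SPEC =====
def Spec_split_keys_by_class (class_of : List (String × String)) (keys : List String) (out : List String × List String × List String) : Prop := out = split_keys_by_class_alt class_of keys
instance (class_of : List (String × String)) (keys : List String) (out : List String × List String × List String) : Decidable (Spec_split_keys_by_class class_of keys out) := by unfold Spec_split_keys_by_class; infer_instance

-- ===== CLAIM (what is proved, stated in full; the proofs are below) =====
def Claim_equal_split_keys_by_class : Prop := ∀ (class_of : List (String × String)) (keys : List String), Dom_split_keys_by_class class_of keys → Spec_split_keys_by_class class_of keys (split_keys_by_class class_of keys)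

-- ===== LEMMAS AND PROOFS =====
theorem split_keys_foldl_inv (class_of : List (String × String)) (keys : List String)
    (p f u : List String) :
    keys.foldl (fun acc k =>
      let c := PySem.Dict.get? (PySem.Dict.mk class_of) k
      if c == some "primitive_only" then (acc.1 ++ [k], acc.2.1, acc.2.2)
      else if c == some "has_freeform" then (acc.1, acc.2.1 ++ [k], acc.2.2)
      else (acc.1, acc.2.1, acc.2.2 ++ [k])) (p, f, u)
    = (p ++ keys.filter (fun k => PySem.Dict.get? (PySem.Dict.mk class_of) k == some "primitive_only"),
       f ++ keys.filter (fun k => PySem.Dict.get? (PySem.Dict.mk class_of) k == some "has_freeform"),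
       u ++ keys.filter (fun k => !(PySem.Dict.get? (PySem.Dict.mk class_of) k == some "primitive_only"
                           || PySem.Dict.get? (PySem.Dict.mk class_of) k == some "has_freeform"))) := by
  induction keys generalizing p f u with
  | nil => simp
  | cons k ks ih =>
    rw [List.foldl_cons]
    simp only [List.filter_cons]
    by_cases h1 : (PySem.Dict.get? (PySem.Dict.mk class_of) k == some "primitive_only") = true
    · rw [beq_iff_eq] at h1
      simp only [h1, ih]
      simp
    · by_cases h2 : (PySem.Dict.get? (PySem.Dict.mk class_of) k == some "has_freeform") = true
      · simp only [h1, h2, Bool.false_eq_true, if_false, if_true, Bool.false_or, Bool.not_true, ih,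
          List.append_assoc, List.singleton_append]
      · simp only [h1, h2, Bool.false_eq_true, if_false, Bool.false_or, Bool.not_false, if_true, ih,
          List.append_assoc, List.singleton_append]

-- ===== VERDICT (by name: the statement is the Claim_ definition above) =====
theorem split_keys_by_class_spec : Claim_equal_split_keys_by_class := by
  intro class_of keys _
  show split_keys_by_class class_of keys = split_keys_by_class_alt class_of keys
  simpa [split_keys_by_class, split_keys_by_class_alt] using
    split_keys_foldl_inv class_of keys [] [] []
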